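-- pv_equiv track=rewrite | github.com/daniel-reich/turbo-robot | vnzjuqjCf4MFHGLJp_19.py | shift_letters
-- ===== SOURCE A (Python) =====
-- def shift_letters(txt, n):
--     l=len(txt)
--     sp=[i for i in range(len(txt)) if txt[i]==' ']
--     txt=txt.replace(' ','')
--     for i in range(n):
--         txt=txt[-1]+txt[:-1]
--     for i in range(l):
--         if i in sp:
--             txt=txt[:i]+' '+txt[i:]
--     return txt
-- ===== SOURCE B (Python) =====
-- def shift_letters(txt, n):
--     letters = [c for c in txt if c != ' ']
--     m = len(letters)
--     r = n % m if (m and n > 0) else 0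
--     rot = letters[m - r:] + letters[:m - r]
--     it = iter(rot)
--     return ''.join(' ' if c == ' ' else next(it) for c in txt)
-- ===== Notes on version B (the rewrite author's own statement) =====
-- stated objective: simpler
-- what changed: Instead of rotating the stripped string one character at a time n times and then re-inserting spaces by repeated slicing over all indices, B computes the effective rotation n % m once with a single slice and rebuilds the result in one pass over the original text, drawing letters from an iterator.
-- outside the precondition, e.g. on shift_letters(' ', 1): A raises IndexError, B returns ' '
import Mathlib
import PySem

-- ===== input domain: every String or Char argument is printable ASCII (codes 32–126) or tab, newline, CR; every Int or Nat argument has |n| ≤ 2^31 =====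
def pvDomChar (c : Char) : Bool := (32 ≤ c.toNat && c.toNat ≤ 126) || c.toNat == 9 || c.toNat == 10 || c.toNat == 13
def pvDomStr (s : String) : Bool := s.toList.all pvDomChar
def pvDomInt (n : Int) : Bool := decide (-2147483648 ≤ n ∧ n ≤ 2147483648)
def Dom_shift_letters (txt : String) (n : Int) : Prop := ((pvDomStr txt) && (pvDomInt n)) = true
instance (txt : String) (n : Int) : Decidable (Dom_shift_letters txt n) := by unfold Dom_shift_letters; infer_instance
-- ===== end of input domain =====

-- B rebuilds the string in one pass; A strips, rotates char-by-char and re-inserts spaces by slicing.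

-- ===== PORT A =====
-- one rotation step: txt = txt[-1] + txt[:-1]
def pvRotStep (t : List Char) : List Char :=
  match PySem.List.pyGet? t (-1) with
  | some c => c :: PySem.List.slice t none (some (-1))
  | none => t     -- Python raises IndexError here; excluded by Pre_

-- one step of the re-insertion loop: if i in sp: txt = txt[:i] + ' ' + txt[i:]
def pvInsStep (sp : List Int) (t : List Char) (i : Int) : List Char :=
  if sp.contains i then
    PySem.List.slice t none (some i) ++ ' ' :: PySem.List.slice t (some i) none
  else t

def shift_letters (txt : String) (n : Int) : String :=
  let s := txt.toList
  let l : Int := (s.length : Int)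
  let sp : List Int := (PySem.List.pyRange 0 l).filter (fun i => PySem.List.pyGet? s i == some ' ')
  let t0 := PySem.Chars.replace s [' '] []
  let t1 := (PySem.List.pyRange 0 n).foldl (fun t _ => pvRotStep t) t0
  let t2 := (PySem.List.pyRange 0 l).foldl (pvInsStep sp) t1
  String.ofList t2

-- ===== PORT B =====
-- single pass over the original text: a space stays, anything else takes the next rotated letter
def pvFill : List Char → List Char → List Char
  | [], _ => []
  | c :: cs, u =>
    if c == ' ' then ' ' :: pvFill cs u
    else match u with
      | x :: xs => x :: pvFill cs xs
      | [] => []     -- iterator exhausted; cannot happen (as many letters as non-spaces)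

def shift_letters_alt (txt : String) (n : Int) : String :=
  let letters := txt.toList.filter (fun c => c != ' ')
  let m := letters.length
  let r : Int := if m ≠ 0 ∧ 0 < n then PySem.Int.mod n (m : Int) else 0
  let k : Int := (m : Int) - r
  let rot := PySem.List.slice letters (some k) none ++ PySem.List.slice letters none (some k)
  String.ofList (pvFill txt.toList rot)

-- ===== PRECONDITION & SPEC =====
-- Pre_ excludes exactly the inputs where A raises IndexError: n > 0 with no non-space character in txt.
def Pre_shift_letters (txt : String) (n : Int) : Prop :=
  0 < n → txt.toList.any (fun c => c != ' ') = true
instance (txt : String) (n : Int) : Decidable (Pre_shift_letters txt n) := by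
  unfold Pre_shift_letters; infer_instance
def pvWitness_shift_letters : String × Int := ("ab cd e", 3)

def Spec_shift_letters (txt : String) (n : Int) (out : String) : Prop := out = shift_letters_alt txt n
instance (txt : String) (n : Int) (out : String) : Decidable (Spec_shift_letters txt n out) := by unfold Spec_shift_letters; infer_instance

-- ===== CLAIM (what is proved, stated in full; the proofs are below) =====
def Claim_equal_shift_letters : Prop := ∀ (txt : String) (n : Int), Dom_shift_letters txt n → Pre_shift_letters txt n → Spec_shift_letters txt n (shift_letters txt n)

-- ===== LEMMAS AND PROOFS =====

-- A's replace(' ','') is the filter B uses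
lemma replace_go_space (fuel : Nat) : ∀ (l acc : List Char), l.length ≤ fuel →
    PySem.Chars.replace.go [' '] [] fuel l acc = acc.reverse ++ l.filter (fun c => c != ' ') := by
  induction fuel with
  | zero =>
    intro l acc h
    have : l = [] := by cases l <;> simp_all
    subst this
    simp [PySem.Chars.replace.go]
  | succ fuel ih =>
    intro l acc h
    cases l with
    | nil => simp [PySem.Chars.replace.go]
    | cons c t =>
      rw [PySem.Chars.replace.go]
      by_cases hc : c = ' '
      · subst hc
        simp only [List.isPrefixOf, BEq.rfl, Bool.true_and, if_true, List.length_cons,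
          List.length_nil, List.drop_succ_cons, List.drop_zero, List.reverse_nil, List.nil_append]
        rw [ih t acc (by simpa using h)]
        simp
      · have hpre : [' '].isPrefixOf (c :: t) = false := by
          simp [List.isPrefixOf]
          exact fun hcc => hc hcc.symm
        rw [hpre]
        simp only [Bool.false_eq_true, if_false]
        rw [ih t (c :: acc) (by simpa using Nat.le_of_succ_le_succ h)]
        simp [hc]

lemma replace_space_eq_filter (s : List Char) :
    PySem.Chars.replace s [' '] [] = s.filter (fun c => c != ' ') := by
  have h := replace_go_space s.length s [] (le_refl _)
  simpa [PySem.Chars.replace] using h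

-- one rotation step on a nonempty list is a left rotation by length-1
lemma pvRotStep_eq_rotate (t : List Char) (h : t ≠ []) :
    pvRotStep t = t.rotate (t.length - 1) := by
  cases t with
  | nil => exact absurd rfl h
  | cons c u =>
    rw [List.rotate_eq_drop_append_take (by simp)]
    unfold pvRotStep
    simp [PySem.List.pyGet?, PySem.List.pyIdx?, PySem.List.slice]
    rw [List.drop_eq_getElem_cons (by simp)]
    simp

lemma foldl_const_iterate {α β : Type} (f : α → α) (xs : List β) (a : α) :
    xs.foldl (fun a _ => f a) a = f^[xs.length] a := by
  induction xs generalizing a with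
  | nil => rfl
  | cons x xs ih => simp [List.foldl_cons, ih, Function.iterate_succ_apply]

lemma iterate_rotStep (k : Nat) (t : List Char) (h : t ≠ []) :
    pvRotStep^[k] t = t.rotate ((t.length - 1) * k) := by
  induction k generalizing t with
  | zero => simp
  | succ k ih =>
    have h1 : t.rotate (t.length - 1) ≠ [] := by
      simpa [List.rotate_eq_nil_iff] using h
    rw [Function.iterate_succ_apply, pvRotStep_eq_rotate t h, ih _ h1,
      List.length_rotate, List.rotate_rotate]
    ring_nf

-- the effective left-rotation amount both programs produce
def pvRho (L : List Char) (n : Int) : Nat :=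
  if 0 < n then L.length - n.toNat % L.length else 0

lemma rotA_eq (L : List Char) (n : Int) (h : 0 < n → L ≠ []) :
    (PySem.List.pyRange 0 n).foldl (fun t _ => pvRotStep t) L = L.rotate (pvRho L n) := by
  by_cases hn : 0 < n
  · have hL := h hn
    have hm : 0 < L.length := List.length_pos_iff.mpr hL
    set m := L.length with hmdef
    have hrange : PySem.List.pyRange 0 n = (List.range n.toNat).map (fun (k : Nat) => (k : Int)) := by
      rw [show n = ((n.toNat : Nat) : Int) from (Int.toNat_of_nonneg (le_of_lt hn)).symm]
      exact PySem.List.pyRange_zero_natCast n.toNat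
    rw [hrange, foldl_const_iterate, List.length_map, List.length_range, iterate_rotStep _ _ hL]
    -- rotate ((m-1) * n') = rotate (m - n' % m)
    set n' := n.toNat with hn'
    set r' := n' % m with hr'
    have hrlt : r' < m := Nat.mod_lt _ hm
    have h1 : (m - 1) * n' ≡ (m - 1) * r' [MOD m] := (Nat.mod_modEq n' m).symm.mul_left _
    have h2 : (m - 1) * r' + r' = m * r' := by
      rw [Nat.sub_mul, Nat.one_mul]
      have hle : r' ≤ m * r' := Nat.le_mul_of_pos_left r' hm
      omega
    have h3 : (m - r') + r' = m := by omega
    have h4 : (m - 1) * r' ≡ m - r' [MOD m] := by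
      have ha : (m - 1) * r' + r' ≡ 0 [MOD m] := by
        rw [h2]; exact (Nat.modEq_zero_iff_dvd).mpr ⟨r', Nat.mul_comm m r' ▸ rfl⟩
      have hb : (m - r') + r' ≡ 0 [MOD m] := by
        rw [h3]; exact (Nat.modEq_zero_iff_dvd).mpr ⟨1, (Nat.mul_one m).symm⟩
      exact Nat.ModEq.add_right_cancel' r' (ha.trans hb.symm)
    have : (m - 1) * n' ≡ m - r' [MOD m] := h1.trans h4
    rw [pvRho, if_pos hn]
    calc L.rotate ((m - 1) * n') = L.rotate (((m - 1) * n') % m) := (List.rotate_mod _ _).symm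
      _ = L.rotate ((m - r') % m) := by rw [this]
      _ = L.rotate (m - r') := List.rotate_mod _ _
  · have hrange : PySem.List.pyRange 0 n = [] := by
      simp [PySem.List.pyRange]
      omega
    rw [hrange, pvRho, if_neg hn]
    simp

lemma rotB_eq (L : List Char) (n : Int) (h : 0 < n → L ≠ []) :
    PySem.List.slice L (some ((L.length : Int) - (if L.length ≠ 0 ∧ 0 < n then PySem.Int.mod n (L.length : Int) else 0))) none ++
      PySem.List.slice L none (some ((L.length : Int) - (if L.length ≠ 0 ∧ 0 < n then PySem.Int.mod n (L.length : Int) else 0))) =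
    L.rotate (pvRho L n) := by
  by_cases hn : 0 < n
  · have hL := h hn
    have hm : 0 < L.length := List.length_pos_iff.mpr hL
    rw [if_pos ⟨by omega, hn⟩]
    have hmod : PySem.Int.mod n (L.length : Int) = ((n.toNat % L.length : Nat) : Int) := by
      rw [PySem.Int.mod_eq_emod_of_pos (by exact_mod_cast hm)]
      rw [show n = ((n.toNat : Nat) : Int) from (Int.toNat_of_nonneg (le_of_lt hn)).symm]
      exact (Int.natCast_mod n.toNat L.length).symm
    rw [hmod]
    have hk : ((L.length : Int) - ((n.toNat % L.length : Nat) : Int)) = (((L.length - n.toNat % L.length : Nat)) : Int) := by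
      have : n.toNat % L.length ≤ L.length := le_of_lt (Nat.mod_lt _ hm)
      omega
    rw [hk, PySem.List.slice_from L (by positivity), PySem.List.slice_to L (by positivity)]
    rw [Int.toNat_natCast]
    rw [pvRho, if_pos hn]
    exact (List.rotate_eq_drop_append_take (by omega)).symm
  · rw [if_neg (by tauto)]
    rw [pvRho, if_neg hn]
    simp only [sub_zero]
    rw [PySem.List.slice_from L (by positivity), PySem.List.slice_to L (by positivity)]
    simp

-- the spaces of full, as A computes them
def pvSp (full : List Char) : List Int :=
  (PySem.List.pyRange 0 (full.length : Int)).filter (fun i => PySem.List.pyGet? full i == some ' ')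

lemma mem_pvSp (full : List Char) (j : Nat) (hj : j < full.length) :
    ((pvSp full).contains ((j : Int)) = true) ↔ full[j]? = some ' ' := by
  rw [List.contains_iff_mem]
  constructor
  · intro hmem
    have h2 := (List.mem_filter.mp hmem).2
    simpa [PySem.List.pyGet?_natCast] using h2
  · intro hb
    refine List.mem_filter.mpr ⟨?_, ?_⟩
    · rw [PySem.List.mem_pyRange_one]; omega
    · simpa [PySem.List.pyGet?_natCast] using hb

-- invariant of A's re-insertion loop: it computes B's single-pass fill
lemma ins_loop (full : List Char) (s : List Char) :
    ∀ (p fp u : List Char), full = p ++ s → fp.length = p.length →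
      u.length = (s.filter (fun c => c != ' ')).length →
      ((List.range s.length).map (fun j => ((p.length + j : Nat) : Int))).foldl
          (pvInsStep (pvSp full)) (fp ++ u) = fp ++ pvFill s u := by
  induction s with
  | nil =>
    intro p fp u hfull hfp hu
    have : u = [] := by simpa using hu
    subst this
    simp [pvFill]
  | cons c cs ih =>
    intro p fp u hfull hfp hu
    have hlt : p.length < full.length := by subst hfull; simp
    have hidx : full[p.length]? = some c := by
      subst hfull
      rw [List.getElem?_append_right (le_refl _)]
      simp
    have hrange : (List.range (c :: cs).length).map (fun j => ((p.length + j : Nat) : Int)) =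
        ((p.length : Int)) :: (List.range cs.length).map (fun j => (((p.length + 1) + j : Nat) : Int)) := by
      rw [show (c :: cs).length = cs.length + 1 from rfl, List.range_succ_eq_map]
      simp [List.map_map, Function.comp]
      intro a ha
      omega
    rw [hrange, List.foldl_cons]
    by_cases hc : c = ' '
    · subst hc
      have hcontains : (pvSp full).contains ((p.length : Int)) = true :=
        (mem_pvSp full p.length hlt).mpr hidx
      have hstep : pvInsStep (pvSp full) (fp ++ u) ((p.length : Int)) = (fp ++ [' ']) ++ u := by
        rw [pvInsStep, if_pos hcontains]
        rw [PySem.List.slice_to _ (by positivity), PySem.List.slice_from _ (by positivity)]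
        rw [Int.toNat_natCast, ← hfp, List.take_left, List.drop_left]
        simp
      rw [hstep]
      have := ih (p ++ [' ']) (fp ++ [' ']) u (by simpa using hfull) (by simp [hfp]) (by simpa using hu)
      simp only [List.length_append, List.length_singleton] at this
      rw [this]
      simp [pvFill]
    · have hcontains : (pvSp full).contains ((p.length : Int)) = false := by
        rw [← Bool.not_eq_true]
        intro hmem
        have := (mem_pvSp full p.length hlt).mp hmem
        rw [hidx] at this
        exact hc (Option.some_inj.mp this)
      have hstep : pvInsStep (pvSp full) (fp ++ u) ((p.length : Int)) = fp ++ u := by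
        rw [pvInsStep, hcontains]
        simp
      rw [hstep]
      have hulen : u.length = (cs.filter (fun c => c != ' ')).length + 1 := by
        simpa [List.filter_cons, hc] using hu
      cases u with
      | nil => simp at hulen
      | cons x u' =>
        have := ih (p ++ [c]) (fp ++ [x]) u' (by simpa using hfull) (by simp [hfp])
          (by simpa using hulen)
        simp only [List.length_append, List.length_singleton] at this
        rw [show fp ++ x :: u' = (fp ++ [x]) ++ u' by simp]
        rw [this]
        simp [pvFill, hc]

-- ===== VERDICT (by name: the statement is the Claim_ definition above) =====
theorem shift_letters_spec : Claim_equal_shift_letters := by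
  intro txt n hdom hpre
  unfold Spec_shift_letters shift_letters shift_letters_alt
  dsimp only
  set s := txt.toList with hs
  set L := List.filter (fun c => c != ' ') s with hL
  have hpre' : 0 < n → L ≠ [] := by
    intro hn
    have hany := hpre hn
    rw [List.any_eq_true] at hany
    obtain ⟨c, hc, hcn⟩ := hany
    intro hnil
    have : c ∈ L := List.mem_filter.mpr ⟨hc, hcn⟩
    rw [hnil] at this
    exact (List.not_mem_nil) this
  rw [replace_space_eq_filter, ← hL]
  rw [rotA_eq L n hpre', rotB_eq L n hpre']
  have hu : (L.rotate (pvRho L n)).length = (List.filter (fun c => c != ' ') s).length := by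
    rw [List.length_rotate, hL]
  have hmain := ins_loop s s ([]) ([]) (L.rotate (pvRho L n)) rfl rfl hu
  unfold pvSp at hmain
  simp only [List.length_nil, Nat.zero_add, List.nil_append] at hmain
  rw [← PySem.List.pyRange_zero_natCast] at hmain
  rw [hmain]
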